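-- pv_equiv track=rewrite | github.com/Kernel360-4cell/algorithm-study | Week 8/PRG_레벨2_괄호 회전하기/hyungjoon_failed.py | solution
-- ===== SOURCE A (Python) =====
-- from collections import deque
--
-- def solution(s):
--     answer = 0
--
--     n = len(s)
--
--     for i in range(n):
--         stack = deque(list(s))
--         flag = True
--         # n번 회전해주기
--         for j in range(i):
--             temp = stack.popleft()
--             stack.append(temp)
--
--         # 개괄호 [, {, ( 의 개수를 관리하는 변수들
--         big, mid, small = 0, 0, 0
--
--         # 옳은 괄호인지 검증
--         for j in stack:
--             if j == '[':
--                 big += 1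
--             elif j == '{':
--                 mid += 1
--             elif j == '(':
--                 small += 1
--             elif j == ']' and big > 0:
--                 big -= 1
--             elif j == '}' and mid > 0:
--                 mid -= 1
--             elif j == ')' and small > 0:
--                 small -= 1
--             else:
--                 flag = False
--                 break
--
--         if flag and big == 0 and mid == 0 and small == 0:
--             answer += 1
--
--     return answer
-- ===== SOURCE B (Python) =====
-- def solution(s):
--     # Cycle lemma per bracket type: a rotation starting at i is valid iff, for each
--     # type, the prefix sum at i is the minimum prefix sum (and each total is 0).
--     db = {'[': 1, ']': -1}
--     dm = {'{': 1, '}': -1}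
--     dp = {'(': 1, ')': -1}
--     b = m = p = 0
--     mb = mm = mp = 0
--     for c in s:
--         if c not in '[]{}()':
--             return 0
--         mb = min(mb, b); mm = min(mm, m); mp = min(mp, p)
--         b += db.get(c, 0); m += dm.get(c, 0); p += dp.get(c, 0)
--     if b or m or p:
--         return 0
--     ans = 0
--     b = m = p = 0
--     for c in s:
--         if b == mb and m == mm and p == mp:
--             ans += 1
--         b += db.get(c, 0); m += dm.get(c, 0); p += dp.get(c, 0)
--     return ans
-- ===== Notes on version B (the rewrite author's own statement) =====
-- stated objective: faster
-- what changed: Replaces A's rotate-then-rescan O(n^2) loop (a fresh deque rotation and a full counter scan per start index) by the per-type cycle lemma: two O(n) passes compute each bracket type's prefix sums, totals and minima, and count the positions where all three prefix sums hit their minima.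
import Mathlib
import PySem

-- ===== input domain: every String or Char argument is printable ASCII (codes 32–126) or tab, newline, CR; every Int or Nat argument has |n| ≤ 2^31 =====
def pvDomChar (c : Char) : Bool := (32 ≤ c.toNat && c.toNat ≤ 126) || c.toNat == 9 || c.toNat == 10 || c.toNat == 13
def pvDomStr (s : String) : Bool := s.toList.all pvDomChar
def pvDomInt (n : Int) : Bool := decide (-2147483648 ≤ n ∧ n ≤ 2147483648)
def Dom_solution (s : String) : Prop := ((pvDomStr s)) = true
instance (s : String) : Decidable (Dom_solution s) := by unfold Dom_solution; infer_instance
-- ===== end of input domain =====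

-- B replaces A's "rotate then re-scan" O(n^2) loop by a per-type cycle-lemma
-- count (valid rotations = common min-prefix positions) in two O(n) passes.

-- ===== PORT A =====
-- popleft+append on a nonempty deque (the deque always holds the whole string here)
def rot1 (xs : List Char) : List Char :=
  match xs with
  | [] => []
  | x :: rest => rest ++ [x]

-- "for j in range(i): temp = stack.popleft(); stack.append(temp)"
def rotA (l : List Char) (i : Nat) : List Char :=
  (List.range i).foldl (fun st _ => rot1 st) l

-- the inner "for j in stack" validation loop, with its break as an early return
def scanA : List Char → Int → Int → Int → Bool × Int × Int × Int
  | [], big, mid, small => (true, big, mid, small)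
  | c :: rest, big, mid, small =>
    if c = '[' then scanA rest (big + 1) mid small
    else if c = '{' then scanA rest big (mid + 1) small
    else if c = '(' then scanA rest big mid (small + 1)
    else if c = ']' ∧ 0 < big then scanA rest (big - 1) mid small
    else if c = '}' ∧ 0 < mid then scanA rest big (mid - 1) small
    else if c = ')' ∧ 0 < small then scanA rest big mid (small - 1)
    else (false, big, mid, small)

def solution (s : String) : Int :=
  let l := s.toList
  let n := l.length
  (List.range n).foldl (fun answer i =>
      let stack := rotA l i
      let r := scanA stack 0 0 0
      if r.1 = true ∧ r.2.1 = 0 ∧ r.2.2.1 = 0 ∧ r.2.2.2 = 0 then answer + 1 else answer)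
    0

-- ===== PORT B =====
def pvDb (c : Char) : Int := if c = '[' then 1 else if c = ']' then -1 else 0
def pvDm (c : Char) : Int := if c = '{' then 1 else if c = '}' then -1 else 0
def pvDp (c : Char) : Int := if c = '(' then 1 else if c = ')' then -1 else 0
def pvIsBr (c : Char) : Bool :=
  c = '[' || c = ']' || c = '{' || c = '}' || c = '(' || c = ')'

-- first pass: bracket check, running sums, running minima (none = "return 0")
def loop1B : List Char → Int → Int → Int → Int → Int → Int →
    Option (Int × Int × Int × Int × Int × Int)
  | [], b, m, p, mb, mm, mp => some (b, m, p, mb, mm, mp)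
  | c :: rest, b, m, p, mb, mm, mp =>
    if pvIsBr c then
      loop1B rest (b + pvDb c) (m + pvDm c) (p + pvDp c) (min mb b) (min mm m) (min mp p)
    else none

-- second pass: count positions whose three prefix sums all equal the minima
def loop2B : List Char → Int → Int → Int → Int → Int → Int → Int → Int
  | [], _, _, _, _, _, _, ans => ans
  | c :: rest, b, m, p, mb, mm, mp, ans =>
    loop2B rest (b + pvDb c) (m + pvDm c) (p + pvDp c) mb mm mp
      (if b = mb ∧ m = mm ∧ p = mp then ans + 1 else ans)

def solution_alt (s : String) : Int :=
  match loop1B s.toList 0 0 0 0 0 0 with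
  | none => 0
  | some (b, m, p, mb, mm, mp) =>
    if b ≠ 0 ∨ m ≠ 0 ∨ p ≠ 0 then 0
    else loop2B s.toList 0 0 0 mb mm mp 0

-- ===== PRECONDITION & SPEC =====
def Spec_solution (s : String) (out : Int) : Prop := out = solution_alt s
instance (s : String) (out : Int) : Decidable (Spec_solution s out) := by unfold Spec_solution; infer_instance

-- ===== CLAIM (what is proved, stated in full; the proofs are below) =====
def Claim_equal_solution : Prop := ∀ (s : String), Dom_solution s → Spec_solution s (solution s)

-- ===== LEMMAS AND PROOFS =====

-- prefix sum of the first k deltas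
def preS (d : Char → Int) : List Char → Nat → Int
  | _, 0 => 0
  | [], _ + 1 => 0
  | c :: rest, k + 1 => d c + preS d rest k

-- running minimum of prefix sums (mirrors loop1B's min accumulator)
def rmin (d : Char → Int) : List Char → Int → Int → Int
  | [], _, mb => mb
  | c :: rest, b, mb => rmin d rest (b + d c) (min mb b)

lemma preS_nil (d : Char → Int) (k : Nat) : preS d [] k = 0 := by
  cases k <;> rfl

lemma preS_zero (d : Char → Int) (xs : List Char) : preS d xs 0 = 0 := by cases xs <;> rfl

lemma preS_append_le (d : Char → Int) (xs ys : List Char) (k : Nat) (h : k ≤ xs.length) :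
    preS d (xs ++ ys) k = preS d xs k := by
  induction xs generalizing k with
  | nil => simp at h; simp [h, preS_zero]
  | cons c rest ih =>
    cases k with
    | zero => rfl
    | succ j =>
      simp only [List.cons_append, preS]
      rw [ih j (by simp at h; omega)]

lemma preS_append_add (d : Char → Int) (xs ys : List Char) (k : Nat) :
    preS d (xs ++ ys) (xs.length + k) = preS d xs xs.length + preS d ys k := by
  induction xs with
  | nil => simp [preS_nil]
  | cons c rest ih =>
    simp only [List.cons_append, List.length_cons]
    have : rest.length + 1 + k = (rest.length + k) + 1 := by omega
    rw [this]
    simp only [preS]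
    rw [ih]; ring

lemma preS_eq_sum (d : Char → Int) (xs : List Char) :
    preS d xs xs.length = (xs.map d).sum := by
  induction xs with
  | nil => rfl
  | cons c rest ih => simp [preS, ih]

lemma preS_perm (d : Char → Int) (xs ys : List Char) (h : xs.Perm ys) :
    preS d xs xs.length = preS d ys ys.length := by
  rw [preS_eq_sum, preS_eq_sum]
  exact List.Perm.sum_eq (h.map d)

lemma preS_take (d : Char → Int) (l : List Char) (i k : Nat) (hk : k ≤ i) (hi : i ≤ l.length) :
    preS d (l.take i) k = preS d l k := by
  conv_rhs => rw [← List.take_append_drop i l]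
  rw [preS_append_le]
  simp
  omega

lemma preS_drop (d : Char → Int) (l : List Char) (i k : Nat) (hi : i ≤ l.length) :
    preS d (l.drop i) k = preS d l (i + k) - preS d l i := by
  have h1 : preS d l (i + k) = preS d (l.take i ++ l.drop i) (i + k) := by
    rw [List.take_append_drop]
  have hlen : (l.take i).length = i := by simp [hi]
  have h2 := preS_append_add d (l.take i) (l.drop i) k
  rw [hlen] at h2
  have h3 : preS d (l.take i) i = preS d l i := preS_take d l i i le_rfl hi
  rw [h3] at h2
  omega

-- rotation as drop ++ take
lemma rotA_succ (l : List Char) (i : Nat) : rotA l (i + 1) = rot1 (rotA l i) := by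
  unfold rotA
  rw [List.range_succ, List.foldl_append]
  rfl

lemma rotA_eq (l : List Char) (i : Nat) (h : i ≤ l.length) :
    rotA l i = l.drop i ++ l.take i := by
  induction i with
  | zero => simp [rotA]
  | succ j ih =>
    have hj : j < l.length := by omega
    rw [rotA_succ, ih (le_of_lt hj)]
    have hdrop : l.drop j = l[j] :: l.drop (j + 1) := List.drop_eq_getElem_cons hj
    rw [hdrop]
    simp only [rot1, List.cons_append]
    rw [List.take_add_one]
    simp [List.getElem?_eq_getElem hj, List.append_assoc]

-- characterization of A's scan succeeding with all counters zero
lemma forall_le_succ_iff {Q : Nat → Prop} {n : Nat} :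
    (∀ k, k ≤ n + 1 → Q k) ↔ Q 0 ∧ (∀ j, j ≤ n → Q (j + 1)) := by
  constructor
  · intro h; exact ⟨h 0 (by omega), fun j hj => h (j + 1) (by omega)⟩
  · rintro ⟨h0, h⟩ k hk
    cases k with
    | zero => exact h0
    | succ j => exact h j (by omega)

-- "the scan from counters (b,m,p) succeeds and ends at zero"
def Good (xs : List Char) (b m p : Int) : Prop :=
  (∀ c ∈ xs, pvIsBr c = true)
  ∧ (∀ k, k ≤ xs.length →
       0 ≤ b + preS pvDb xs k ∧ 0 ≤ m + preS pvDm xs k ∧ 0 ≤ p + preS pvDp xs k)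
  ∧ b + preS pvDb xs xs.length = 0 ∧ m + preS pvDm xs xs.length = 0
    ∧ p + preS pvDp xs xs.length = 0

lemma good_cons (c : Char) (rest : List Char) (b m p : Int)
    (hb : 0 ≤ b) (hm : 0 ≤ m) (hp : 0 ≤ p) :
    Good (c :: rest) b m p ↔
      pvIsBr c = true ∧ Good rest (b + pvDb c) (m + pvDm c) (p + pvDp c) := by
  unfold Good
  simp only [List.mem_cons, List.length_cons, preS, forall_le_succ_iff]
  constructor
  · rintro ⟨hbr, ⟨_, hk⟩, t1, t2, t3⟩
    refine ⟨hbr c (Or.inl rfl), fun x hx => hbr x (Or.inr hx), fun j hj => ?_, by omega, by omega, by omega⟩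
    have := hk j hj; omega
  · rintro ⟨hc, hbr, hk, t1, t2, t3⟩
    refine ⟨?_, ⟨⟨by omega, by omega, by omega⟩, fun j hj => ?_⟩, by omega, by omega, by omega⟩
    · rintro x (rfl | hx)
      · exact hc
      · exact hbr x hx
    · have := hk j hj; omega

lemma scan_char (xs : List Char) : ∀ b m p : Int, 0 ≤ b → 0 ≤ m → 0 ≤ p →
    (scanA xs b m p = (true, 0, 0, 0) ↔ Good xs b m p) := by
  induction xs with
  | nil =>
    intro b m p hb hm hp
    unfold Good
    constructor
    · intro h
      simp only [scanA, Prod.mk.injEq, true_and] at h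
      refine ⟨by simp, fun k _ => by simp [preS_nil]; omega, ?_, ?_, ?_⟩ <;> simp [preS_zero] <;> omega
    · rintro ⟨_, _, t1, t2, t3⟩
      simp only [List.length_nil, preS_zero] at t1 t2 t3
      simp [scanA]; omega
  | cons c rest ih =>
    intro b m p hb hm hp
    rw [good_cons c rest b m p hb hm hp]
    simp only [scanA]
    split_ifs with h1 h2 h3 h4 h5 h6
    · subst h1
      rw [ih (b + 1) m p (by omega) hm hp]
      simp [pvIsBr, pvDb, pvDm, pvDp]
    · subst h2
      rw [ih b (m + 1) p hb (by omega) hp]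
      simp [pvIsBr, pvDb, pvDm, pvDp]
    · subst h3
      rw [ih b m (p + 1) hb hm (by omega)]
      simp [pvIsBr, pvDb, pvDm, pvDp]
    · obtain ⟨rfl, hbpos⟩ := h4
      rw [ih (b - 1) m p (by omega) hm hp]
      simp [pvIsBr, pvDb, pvDm, pvDp, sub_eq_add_neg]
    · obtain ⟨rfl, hmpos⟩ := h5
      rw [ih b (m - 1) p hb (by omega) hp]
      simp [pvIsBr, pvDb, pvDm, pvDp, sub_eq_add_neg]
    · obtain ⟨rfl, hppos⟩ := h6
      rw [ih b m (p - 1) hb hm (by omega)]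
      simp [pvIsBr, pvDb, pvDm, pvDp, sub_eq_add_neg]
    · -- break: either a non-bracket char, or a closer whose counter is 0
      constructor
      · intro habs; simp at habs
      · rintro ⟨hc, _, hk, _⟩
        exfalso
        have hk0 := hk 0 (by omega)
        by_cases e1 : c = '['
        · exact h1 e1
        by_cases e2 : c = '{'
        · exact h2 e2
        by_cases e3 : c = '('
        · exact h3 e3
        by_cases e4 : c = ']'
        · subst e4
          have hb0 : b ≤ 0 := by
            by_contra hpos; exact h4 ⟨rfl, by omega⟩
          simp [pvDb, preS_zero] at hk0; omega
        by_cases e5 : c = '}'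
        · subst e5
          have hm0 : m ≤ 0 := by
            by_contra hpos; exact h5 ⟨rfl, by omega⟩
          simp [pvDm, preS_zero] at hk0; omega
        by_cases e6 : c = ')'
        · subst e6
          have hp0 : p ≤ 0 := by
            by_contra hpos; exact h6 ⟨rfl, by omega⟩
          simp [pvDp, preS_zero] at hk0; omega
        · simp [pvIsBr, e1, e2, e3, e4, e5, e6] at hc

-- loop1B characterization
lemma loop1_char (xs : List Char) : ∀ b m p mb mm mp : Int,
    loop1B xs b m p mb mm mp =
      if ∀ c ∈ xs, pvIsBr c = true then
        some (b + preS pvDb xs xs.length, m + preS pvDm xs xs.length, p + preS pvDp xs xs.length,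
              rmin pvDb xs b mb, rmin pvDm xs m mm, rmin pvDp xs p mp)
      else none := by
  induction xs with
  | nil =>
    intro b m p mb mm mp
    simp [loop1B, rmin, preS_zero]
  | cons c rest ih =>
    intro b m p mb mm mp
    simp only [loop1B]
    by_cases hc : pvIsBr c
    · rw [if_pos hc, ih]
      simp only [List.length_cons, preS, rmin, List.mem_cons]
      by_cases hrest : ∀ x ∈ rest, pvIsBr x = true
      · rw [if_pos hrest, if_pos (by rintro x (rfl | hx); exact hc; exact hrest x hx)]
        simp [add_assoc]
      · rw [if_neg hrest, if_neg (by intro h; exact hrest fun x hx => h x (Or.inr hx))]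
    · rw [if_neg hc, if_neg (by intro h; exact hc (h c (List.mem_cons_self)))]

-- rmin properties
lemma rmin_le_init (d : Char → Int) (xs : List Char) : ∀ b mb : Int, rmin d xs b mb ≤ mb := by
  induction xs with
  | nil => intro b mb; simp [rmin]
  | cons c rest ih =>
    intro b mb
    exact le_trans (ih _ _) (min_le_left _ _)

lemma rmin_le_pre (d : Char → Int) (xs : List Char) : ∀ b mb : Int, ∀ k, k < xs.length →
    rmin d xs b mb ≤ b + preS d xs k := by
  induction xs with
  | nil => intro b mb k hk; simp at hk
  | cons c rest ih =>
    intro b mb k hk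
    cases k with
    | zero =>
      simp only [preS, add_zero]
      exact le_trans (rmin_le_init d rest _ _) (min_le_right _ _)
    | succ j =>
      have := ih (b + d c) (min mb b) j (by simpa using hk)
      simp only [rmin, preS]
      omega

lemma rmin_attained (d : Char → Int) (xs : List Char) : ∀ b mb : Int,
    rmin d xs b mb = mb ∨ ∃ k < xs.length, rmin d xs b mb = b + preS d xs k := by
  induction xs with
  | nil => intro b mb; left; rfl
  | cons c rest ih =>
    intro b mb
    rcases ih (b + d c) (min mb b) with h | ⟨k, hk, h⟩
    · by_cases hle : mb ≤ b
      · left; simp only [rmin]; rw [h]; omega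
      · right
        refine ⟨0, by simp, ?_⟩
        simp only [rmin, preS_zero]
        rw [h]; omega
    · right
      exact ⟨k + 1, by simpa using hk, by simp only [rmin, preS]; omega⟩

-- fold-to-count lemmas
lemma foldl_ite_count (f : Nat → Prop) [DecidablePred f] :
    ∀ (xs : List Nat) (a : Int),
      xs.foldl (fun acc i => if f i then acc + 1 else acc) a
        = a + (xs.countP (fun i => decide (f i)) : Int) := by
  intro xs
  induction xs with
  | nil => intro a; simp
  | cons x rest ih =>
    intro a
    simp only [List.foldl_cons, List.countP_cons, ih]
    by_cases h : f x <;> simp [h] <;> ring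

lemma loop2_char (xs : List Char) : ∀ b m p mb mm mp ans : Int,
    loop2B xs b m p mb mm mp ans
      = ans + ((List.range xs.length).countP
          (fun k => decide (b + preS pvDb xs k = mb ∧ m + preS pvDm xs k = mm
                            ∧ p + preS pvDp xs k = mp)) : Int) := by
  induction xs with
  | nil => intro b m p mb mm mp ans; simp [loop2B]
  | cons c rest ih =>
    intro b m p mb mm mp ans
    simp only [loop2B]
    rw [ih]
    rw [List.length_cons, List.range_succ_eq_map, List.countP_cons, List.countP_map]
    have hfun : ((fun k => decide (b + preS pvDb (c :: rest) k = mb ∧ m + preS pvDm (c :: rest) k = mm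
          ∧ p + preS pvDp (c :: rest) k = mp)) ∘ Nat.succ)
        = fun k => decide (b + pvDb c + preS pvDb rest k = mb ∧ m + pvDm c + preS pvDm rest k = mm
          ∧ p + pvDp c + preS pvDp rest k = mp) := by
      funext k
      rw [Function.comp_apply, decide_eq_decide]
      simp only [preS]
      constructor <;> (rintro ⟨a1, a2, a3⟩; refine ⟨by omega, by omega, by omega⟩)
    rw [hfun]
    simp only [preS_zero, add_zero]
    by_cases h : b = mb ∧ m = mm ∧ p = mp
    · rw [if_pos h]
      simp [h]
      ring
    · rw [if_neg h]
      simp [h]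

-- cycle lemma: non-negativity of all rotated prefixes ↔ i is a min-prefix position
lemma rot_nonneg_iff (d : Char → Int) (l : List Char) (i : Nat) (hi : i < l.length)
    (hT : preS d l l.length = 0) :
    ((∀ k, k ≤ l.length → 0 ≤ preS d (l.drop i ++ l.take i) k) ↔
      (∀ j, j < l.length → preS d l i ≤ preS d l j)) := by
  have hdl : (l.drop i).length = l.length - i := by simp
  constructor
  · intro H j hj
    by_cases hij : i ≤ j
    · have h1 := H (j - i) (by omega)
      rw [preS_append_le d _ _ _ (by omega)] at h1
      rw [preS_drop d l i (j - i) (by omega)] at h1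
      rw [show i + (j - i) = j from by omega] at h1
      omega
    · replace hij : j < i := by omega
      have h1 := H ((l.length - i) + j) (by omega)
      have e := preS_append_add d (l.drop i) (l.take i) j
      rw [hdl] at e
      rw [e] at h1
      have e2 : preS d (l.drop i) (l.length - i) = preS d l l.length - preS d l i := by
        rw [preS_drop d l i (l.length - i) (by omega),
            show i + (l.length - i) = l.length from by omega]
      have e3 : preS d (l.take i) j = preS d l j := preS_take d l i j (by omega) (by omega)
      omega
  · intro H k hk
    have h00 : preS d l 0 = 0 := preS_zero d l
    have hi0 : preS d l i ≤ 0 := by have := H 0 (by omega); omega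
    by_cases hk2 : k ≤ l.length - i
    · rw [preS_append_le d _ _ _ (by omega)]
      rw [preS_drop d l i k (by omega)]
      rcases Nat.lt_or_ge (i + k) l.length with h | h
      · have := H (i + k) h; omega
      · have e1 : preS d l (i + k) = 0 := by
          rw [show i + k = l.length from by omega]; exact hT
        omega
    · replace hk2 : l.length - i < k := by omega
      have hk3 : k = (l.drop i).length + (k - (l.length - i)) := by omega
      rw [hk3, preS_append_add]
      have e2 : preS d (l.drop i) (l.drop i).length = - preS d l i := by
        rw [hdl, preS_drop d l i (l.length - i) (by omega),
            show i + (l.length - i) = l.length from by omega, hT]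
        ring
      have hj : k - (l.length - i) ≤ i := by omega
      have e3 : preS d (l.take i) (k - (l.length - i)) = preS d l (k - (l.length - i)) :=
        preS_take d l i _ hj (by omega)
      have := H (k - (l.length - i)) (by omega)
      omega

lemma rmin_eq_iff (d : Char → Int) (l : List Char) (i : Nat) (hi : i < l.length) :
    (preS d l i = rmin d l 0 0) ↔ (∀ j, j < l.length → preS d l i ≤ preS d l j) := by
  constructor
  · intro h j hj
    have := rmin_le_pre d l 0 0 j hj
    omega
  · intro H
    have h1 := rmin_le_pre d l 0 0 i hi
    have h2 : preS d l i ≤ rmin d l 0 0 := by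
      rcases rmin_attained d l 0 0 with h | ⟨k, hk, h⟩
      · have := H 0 (by omega)
        have h0 := preS_zero d l
        omega
      · have := H k hk; omega
    omega

lemma rot_perm (l : List Char) (i : Nat) : (l.drop i ++ l.take i).Perm l :=
  (List.perm_append_comm).trans (by rw [List.take_append_drop])

-- under "all brackets, all totals zero": rotation i is valid iff i is a common min-prefix position
lemma validA_iff (l : List Char) (i : Nat) (hi : i < l.length)
    (hbr : ∀ c ∈ l, pvIsBr c = true)
    (hTb : preS pvDb l l.length = 0) (hTm : preS pvDm l l.length = 0)
    (hTp : preS pvDp l l.length = 0) :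
    (scanA (rotA l i) 0 0 0 = (true, 0, 0, 0) ↔
      (preS pvDb l i = rmin pvDb l 0 0 ∧ preS pvDm l i = rmin pvDm l 0 0
        ∧ preS pvDp l i = rmin pvDp l 0 0)) := by
  have hperm := rot_perm l i
  rw [rotA_eq l i (le_of_lt hi), scan_char _ 0 0 0 le_rfl le_rfl le_rfl]
  unfold Good
  have hlen : (l.drop i ++ l.take i).length = l.length := by simp; omega
  constructor
  · rintro ⟨_, hk, _⟩
    rw [hlen] at hk
    simp only [zero_add] at hk
    refine ⟨(rmin_eq_iff pvDb l i hi).mpr ((rot_nonneg_iff pvDb l i hi hTb).mp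
              (fun k h => (hk k h).1)),
            (rmin_eq_iff pvDm l i hi).mpr ((rot_nonneg_iff pvDm l i hi hTm).mp
              (fun k h => (hk k h).2.1)),
            (rmin_eq_iff pvDp l i hi).mpr ((rot_nonneg_iff pvDp l i hi hTp).mp
              (fun k h => (hk k h).2.2))⟩
  · rintro ⟨e1, e2, e3⟩
    refine ⟨fun c hc => hbr c (hperm.subset hc), ?_, ?_, ?_, ?_⟩
    · intro k hk
      rw [hlen] at hk
      simp only [zero_add]
      exact ⟨(rot_nonneg_iff pvDb l i hi hTb).mpr ((rmin_eq_iff pvDb l i hi).mp e1) k hk,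
             (rot_nonneg_iff pvDm l i hi hTm).mpr ((rmin_eq_iff pvDm l i hi).mp e2) k hk,
             (rot_nonneg_iff pvDp l i hi hTp).mpr ((rmin_eq_iff pvDp l i hi).mp e3) k hk⟩
    · rw [zero_add, preS_perm pvDb _ l hperm]; exact hTb
    · rw [zero_add, preS_perm pvDm _ l hperm]; exact hTm
    · rw [zero_add, preS_perm pvDp _ l hperm]; exact hTp

lemma cond4_iff (r : Bool × Int × Int × Int) :
    (r.1 = true ∧ r.2.1 = 0 ∧ r.2.2.1 = 0 ∧ r.2.2.2 = 0) ↔ r = (true, 0, 0, 0) := by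
  obtain ⟨a, b, c, d⟩ := r
  simp [Prod.ext_iff]

theorem solution_spec : Claim_equal_solution := by
  unfold Claim_equal_solution Spec_solution
  intro s _
  simp only [solution, solution_alt]
  rw [foldl_ite_count (fun i => (scanA (rotA s.toList i) 0 0 0).1 = true
        ∧ (scanA (rotA s.toList i) 0 0 0).2.1 = 0
        ∧ (scanA (rotA s.toList i) 0 0 0).2.2.1 = 0
        ∧ (scanA (rotA s.toList i) 0 0 0).2.2.2 = 0)]
  rw [loop1_char]
  by_cases hbr : ∀ c ∈ s.toList, pvIsBr c = true
  · rw [if_pos hbr]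
    simp only [zero_add]
    by_cases hT : preS pvDb s.toList s.toList.length = 0
        ∧ preS pvDm s.toList s.toList.length = 0 ∧ preS pvDp s.toList s.toList.length = 0
    · obtain ⟨hTb, hTm, hTp⟩ := hT
      rw [if_neg (by rintro (h | h | h); exacts [h hTb, h hTm, h hTp])]
      rw [loop2_char]
      simp only [zero_add]
      congr 1
      apply List.countP_congr
      intro i hiR
      have hi : i < s.toList.length := List.mem_range.mp hiR
      simp only [decide_eq_true_eq]
      rw [cond4_iff]
      exact validA_iff s.toList i hi hbr hTb hTm hTp
    · rw [if_pos (by omega)]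
      rw [show ((List.range s.toList.length).countP (fun i =>
            decide ((scanA (rotA s.toList i) 0 0 0).1 = true
              ∧ (scanA (rotA s.toList i) 0 0 0).2.1 = 0
              ∧ (scanA (rotA s.toList i) 0 0 0).2.2.1 = 0
              ∧ (scanA (rotA s.toList i) 0 0 0).2.2.2 = 0))) = 0 from ?_]
      · simp
      apply List.countP_eq_zero.mpr
      intro i hiR
      have hi : i < s.toList.length := List.mem_range.mp hiR
      simp only [decide_eq_true_eq]
      rw [cond4_iff]
      intro hsc
      have hperm := rot_perm s.toList i
      rw [rotA_eq s.toList i (le_of_lt hi),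
          scan_char _ 0 0 0 le_rfl le_rfl le_rfl] at hsc
      obtain ⟨_, _, t1, t2, t3⟩ := hsc
      rw [zero_add, preS_perm pvDb _ s.toList hperm] at t1
      rw [zero_add, preS_perm pvDm _ s.toList hperm] at t2
      rw [zero_add, preS_perm pvDp _ s.toList hperm] at t3
      exact hT ⟨t1, t2, t3⟩
  · rw [if_neg hbr]
    rw [show ((List.range s.toList.length).countP (fun i =>
          decide ((scanA (rotA s.toList i) 0 0 0).1 = true
            ∧ (scanA (rotA s.toList i) 0 0 0).2.1 = 0
            ∧ (scanA (rotA s.toList i) 0 0 0).2.2.1 = 0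
            ∧ (scanA (rotA s.toList i) 0 0 0).2.2.2 = 0))) = 0 from ?_]
    · simp
    apply List.countP_eq_zero.mpr
    intro i hiR
    have hi : i < s.toList.length := List.mem_range.mp hiR
    simp only [decide_eq_true_eq]
    rw [cond4_iff]
    intro hsc
    have hperm := rot_perm s.toList i
    rw [rotA_eq s.toList i (le_of_lt hi),
        scan_char _ 0 0 0 le_rfl le_rfl le_rfl] at hsc
    exact hbr fun c hc => hsc.1 c (hperm.mem_iff.mpr hc)
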